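-- pv_equiv track=rewrite | github.com/Luis-GG/python_ds_practice | 38_min_max_key_in_dictionary/min_max_key_in_dictionary.py | min_max_keys
-- ===== SOURCE A (Python) =====
-- def min_max_keys(d):
--     """Return tuple (min-keys, max-keys) in d.
--
--         >>> min_max_keys({2: 'a', 7: 'b', 1: 'c', 10: 'd', 4: 'e'})
--         (1, 10)
--
--     Works with any kind of key that can be compared, like strings:
--
--         >>> min_max_keys({"apple": "red", "cherry": "red", "berry": "blue"})
--         ('apple', 'cherry')
--     """
--     keys_list = list(d.keys())
--
--     min_key = keys_list[0]
--     max_key = keys_list[0]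
--
--     for num in keys_list:
--         if num < min_key:
--             min_key = num
--         if num > max_key:
--             max_key = num
--
--     return (min_key, max_key)
-- ===== SOURCE B (Python) =====
-- def min_max_keys(d):
--     s = sorted(d)
--     return (s[0], s[-1])
-- ===== Notes on version B (the rewrite author's own statement) =====
-- stated objective: simpler
-- what changed: Replaces the comparison loop tracking running min/max with a single sort of the keys, returning the first and last element.
import Mathlib
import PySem

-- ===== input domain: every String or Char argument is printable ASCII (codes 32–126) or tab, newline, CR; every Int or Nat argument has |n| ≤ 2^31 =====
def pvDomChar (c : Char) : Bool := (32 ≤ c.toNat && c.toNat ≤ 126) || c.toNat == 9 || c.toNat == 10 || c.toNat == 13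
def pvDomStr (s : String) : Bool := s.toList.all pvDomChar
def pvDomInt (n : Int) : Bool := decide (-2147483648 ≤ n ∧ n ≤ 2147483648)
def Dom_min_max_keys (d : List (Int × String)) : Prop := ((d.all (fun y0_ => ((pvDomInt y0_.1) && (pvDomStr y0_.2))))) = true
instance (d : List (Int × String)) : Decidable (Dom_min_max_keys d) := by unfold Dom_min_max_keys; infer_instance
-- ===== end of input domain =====

-- ===== PORT A =====
-- B sorts the keys once and takes first/last instead of A's running min/max loop (objective: simpler).
-- Pre_ excludes the empty dict, on which both Pythons raise IndexError.
def min_max_keys (d : List (Int × String)) : Int × Int :=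
  let keys_list := PySem.List.dedup (d.map Prod.fst)
  -- keys_list[0]; Pre_ guarantees nonempty, default never used
  let k0 := keys_list.headD 0
  keys_list.foldl (fun mm num =>
    ((if num < mm.1 then num else mm.1), (if num > mm.2 then num else mm.2))) (k0, k0)

-- ===== PORT B =====
def min_max_keys_alt (d : List (Int × String)) : Int × Int :=
  let s := PySem.List.sorted (PySem.List.dedup (d.map Prod.fst)) (fun x => x) false
  (PySem.List.pyGetD s 0 0, PySem.List.pyGetD s (-1) 0)

-- ===== PRECONDITION & SPEC =====
def Pre_min_max_keys (d : List (Int × String)) : Prop := d ≠ []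
instance (d : List (Int × String)) : Decidable (Pre_min_max_keys d) := by unfold Pre_min_max_keys; infer_instance
def pvWitness_min_max_keys : (List (Int × String)) := [(2, "a"), (7, "b"), (1, "c")]
def Spec_min_max_keys (d : List (Int × String)) (out : Int × Int) : Prop := out = min_max_keys_alt d
instance (d : List (Int × String)) (out : Int × Int) : Decidable (Spec_min_max_keys d out) := by unfold Spec_min_max_keys; infer_instance

-- ===== CLAIM (what is proved, stated in full; the proofs are below) =====
def Claim_equal_min_max_keys : Prop := ∀ (d : List (Int × String)), Dom_min_max_keys d → Pre_min_max_keys d → Spec_min_max_keys d (min_max_keys d)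

-- ===== LEMMAS AND PROOFS =====

lemma foldl_pair_split (l : List Int) (a b : Int) :
    l.foldl (fun (mm : Int × Int) num =>
      ((if num < mm.1 then num else mm.1), (if num > mm.2 then num else mm.2))) (a, b)
    = (l.foldl (fun m num => if num < m then num else m) a,
       l.foldl (fun m num => if num > m then num else m) b) := by
  induction l generalizing a b with
  | nil => rfl
  | cons x t ih => simp [List.foldl_cons, ih]

lemma foldl_min_spec (l : List Int) (a : Int) :
    (l.foldl (fun m num => if num < m then num else m) a) ∈ a :: l ∧
    ∀ x ∈ a :: l, l.foldl (fun m num => if num < m then num else m) a ≤ x := by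
  induction l generalizing a with
  | nil => simp
  | cons y t ih =>
    obtain ⟨h1, h2⟩ := ih (if y < a then y else a)
    have hle := h2 _ (List.mem_cons_self ..)
    simp only [List.foldl_cons]
    refine ⟨?_, ?_⟩
    · rcases List.mem_cons.mp h1 with h | h
      · rw [h]; by_cases hy : y < a <;> simp [hy]
      · exact List.mem_cons_of_mem _ (List.mem_cons_of_mem _ h)
    · intro x hx
      simp only [List.mem_cons] at hx
      rcases hx with rfl | rfl | hx
      · refine hle.trans ?_; split_ifs with hy <;> omega
      · refine hle.trans ?_; split_ifs with hy <;> omega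
      · exact h2 _ (List.mem_cons_of_mem _ hx)

lemma foldl_max_spec (l : List Int) (a : Int) :
    (l.foldl (fun m num => if num > m then num else m) a) ∈ a :: l ∧
    ∀ x ∈ a :: l, x ≤ l.foldl (fun m num => if num > m then num else m) a := by
  induction l generalizing a with
  | nil => simp
  | cons y t ih =>
    obtain ⟨h1, h2⟩ := ih (if y > a then y else a)
    have hle := h2 _ (List.mem_cons_self ..)
    simp only [List.foldl_cons]
    refine ⟨?_, ?_⟩
    · rcases List.mem_cons.mp h1 with h | h
      · rw [h]; by_cases hy : y > a <;> simp [hy]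
      · exact List.mem_cons_of_mem _ (List.mem_cons_of_mem _ h)
    · intro x hx
      simp only [List.mem_cons] at hx
      rcases hx with rfl | rfl | hx
      · refine le_trans ?_ hle; split_ifs with hy <;> omega
      · refine le_trans ?_ hle; split_ifs with hy <;> omega
      · exact h2 _ (List.mem_cons_of_mem _ hx)

lemma pairwise_le_getLast (l : List Int) (h : l.Pairwise (· ≤ ·)) (hne : l ≠ []) :
    ∀ x ∈ l, x ≤ l.getLast hne := by
  induction l with
  | nil => simp at hne
  | cons y t ih =>
    intro x hx
    rcases List.pairwise_cons.mp h with ⟨hy, ht⟩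
    by_cases htn : t = []
    · subst htn; simp_all
    · rw [List.getLast_cons htn]
      rcases List.mem_cons.mp hx with rfl | hx
      · exact hy _ (List.getLast_mem htn)
      · exact ih ht htn _ hx

lemma minmax_eq_sorted_ends (l : List Int) (hlne : l ≠ []) :
    l.foldl (fun (mm : Int × Int) num =>
      ((if num < mm.1 then num else mm.1), (if num > mm.2 then num else mm.2)))
      (l.headD 0, l.headD 0)
    = (PySem.List.pyGetD (PySem.List.sorted l (fun x => x) false) 0 0,
       PySem.List.pyGetD (PySem.List.sorted l (fun x => x) false) (-1) 0) := by
  obtain ⟨k, t, rfl⟩ := List.exists_cons_of_ne_nil hlne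
  have hsne : PySem.List.sorted (k :: t) (fun x => x) false ≠ [] := by
    simp [PySem.List.sorted_eq_nil_iff]
  obtain ⟨m, t', hmt⟩ := List.exists_cons_of_ne_nil hsne
  have hmem : ∀ x : Int, x ∈ PySem.List.sorted (k :: t) (fun x => x) false ↔ x ∈ k :: t :=
    fun x => PySem.List.mem_sorted _ _ _ x
  rw [foldl_pair_split]
  simp only [List.headD_cons]
  obtain ⟨hmin_mem, hmin_le⟩ := foldl_min_spec (k :: t) k
  obtain ⟨hmax_mem, hmax_ge⟩ := foldl_max_spec (k :: t) k
  have hmemkk : ∀ x : Int, x ∈ k :: k :: t ↔ x ∈ k :: t := by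
    intro x; simp [List.mem_cons]
  rw [Prod.mk.injEq]
  constructor
  · -- min component equals the sorted head
    have hhead : ∀ y ∈ k :: t, m ≤ y := PySem.List.key_head_sorted_le _ _ hmt
    have h1 : m ≤ (k :: t).foldl (fun m num => if num < m then num else m) k :=
      hhead _ ((hmemkk _).mp hmin_mem)
    have h2 : (k :: t).foldl (fun m num => if num < m then num else m) k ≤ m := by
      refine hmin_le _ ((hmemkk _).mpr ?_)
      exact (hmem m).mp (hmt ▸ List.mem_cons_self ..)
    rw [hmt, PySem.List.pyGetD_zero_cons]
    omega
  · -- max component equals the sorted last element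
    have hpw : (PySem.List.sorted (k :: t) (fun x => x) false).Pairwise (· ≤ ·) :=
      PySem.List.sorted_pairwise _ _
    have hlast := pairwise_le_getLast _ hpw hsne
    have hlast_mem : (PySem.List.sorted (k :: t) (fun x => x) false).getLast hsne ∈ k :: t :=
      (hmem _).mp (List.getLast_mem hsne)
    have h1 : (k :: t).foldl (fun m num => if num > m then num else m) k ≤
        (PySem.List.sorted (k :: t) (fun x => x) false).getLast hsne := by
      refine hlast _ ((hmem _).mpr ?_)
      exact (hmemkk _).mp hmax_mem
    have h2 := hmax_ge _ ((hmemkk _).mpr hlast_mem)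
    rw [PySem.List.pyGetD_neg_one _ 0 hsne]
    omega

-- ===== VERDICT (by name: the statement is the Claim_ definition above) =====
theorem min_max_keys_spec : Claim_equal_min_max_keys := by
  intro d _ hpre
  unfold Spec_min_max_keys min_max_keys min_max_keys_alt
  have hlne : PySem.List.dedup (d.map Prod.fst) ≠ [] := by
    rcases d with _ | ⟨p, rest⟩
    · exact absurd rfl hpre
    · exact List.ne_nil_of_mem ((PySem.List.mem_dedup _ p.1).mpr (by simp))
  exact (minmax_eq_sorted_ends _ hlne).symm ▸ rfl
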